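-- pv_equiv track=rewrite | github.com/wbnet/ChatGTP-AI-Python-Testing | Script005.py | parse_interface_errors
-- ===== SOURCE A (Python) =====
-- def parse_interface_errors(output):
--     errors = {}
--     current_interface = None
--     for line in output.splitlines():
--         if "line protocol" in line:
--             current_interface = line.split(" ")[0]
--         if current_interface:
--             if any(err in line for err in ["input errors", "CRC", "output drops", "collisions"]):
--                 errors.setdefault(current_interface, []).append(line.strip())
--     return errors
-- ===== SOURCE B (Python) =====
-- _KEYWORDS = ("input errors", "CRC", "output drops", "collisions")
--
--
-- def parse_interface_errors(output):
--     # pass 1: tag each line with the interface currently in effect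
--     tagged = []
--     current = None
--     for line in output.splitlines():
--         if "line protocol" in line:
--             current = line.split(" ")[0]
--         if current:
--             tagged.append((current, line))
--     # pass 2: keep only error lines, grouped by interface
--     errors = {}
--     for iface, line in tagged:
--         if any(k in line for k in _KEYWORDS):
--             errors.setdefault(iface, []).append(line.strip())
--     return errors
-- ===== Notes on version B (the rewrite author's own statement) =====
-- stated objective: alternative
-- what changed: Replaces A's single interleaved set-state-and-filter loop with a two-pass group-then-filter shape: pass 1 tags each line with the interface currently in effect, pass 2 filters the tagged lines by the error keywords and groups them.
import Mathlib
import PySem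

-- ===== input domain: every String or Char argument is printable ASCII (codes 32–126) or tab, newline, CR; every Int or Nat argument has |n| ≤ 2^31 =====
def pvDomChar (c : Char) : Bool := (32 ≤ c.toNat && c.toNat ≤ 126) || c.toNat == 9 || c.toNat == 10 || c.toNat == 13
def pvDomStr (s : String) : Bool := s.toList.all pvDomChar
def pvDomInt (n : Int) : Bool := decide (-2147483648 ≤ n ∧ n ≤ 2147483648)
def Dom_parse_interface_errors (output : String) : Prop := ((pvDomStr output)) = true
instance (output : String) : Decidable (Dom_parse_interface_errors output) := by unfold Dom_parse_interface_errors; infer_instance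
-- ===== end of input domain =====

-- B replaces A's interleaved set-state-and-filter loop with a two-pass shape (tag lines with their interface, then filter/group); same cost, alternative decomposition.


-- ===== PORT A =====
-- shared line-level helpers (atomic predicates both Pythons use verbatim)
def pvKeywords : List String := ["input errors", "CRC", "output drops", "collisions"]

-- first token of `line.split(" ")[0]` (the list is never empty, so [0] never raises)
def pvFirstTok (line : String) : String :=
  ((PySem.Str.split? line " ").getD []).headD ""

-- Python truthiness of the `current_interface` variable (None or "" is falsy)
def pvTruthy (s : Option String) : Bool :=
  match s with
  | none => false
  | some s => !(s.toList == [])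

def pvIsErr (line : String) : Bool :=
  pvKeywords.any (fun err => PySem.Str.isIn err line)

-- A: one loop that both updates current_interface and filters into the dict
def parse_interface_errors (output : String) : List (String × List String) :=
  ((PySem.Str.splitlines output).foldl
    (fun (st : PySem.Dict String (List String) × Option String) line =>
      let cur := if PySem.Str.isIn "line protocol" line then some (pvFirstTok line) else st.2
      let errs :=
        if pvTruthy cur then
          if pvIsErr line then st.1.modify (cur.getD "") [] (fun l => l ++ [PySem.Str.strip line])
          else st.1
        else st.1
      (errs, cur))
    (PySem.Dict.empty, none)).1.items

-- ===== PORT B =====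
-- B pass 1: tag each line with the interface currently in effect
def pvTagged (output : String) : List (String × String) :=
  ((PySem.Str.splitlines output).foldl
    (fun (st : List (String × String) × Option String) line =>
      let cur := if PySem.Str.isIn "line protocol" line then some (pvFirstTok line) else st.2
      (if pvTruthy cur then st.1 ++ [(cur.getD "", line)] else st.1, cur))
    ([], none)).1

-- B pass 2: keep only error lines, grouped by interface
def parse_interface_errors_alt (output : String) : List (String × List String) :=
  ((pvTagged output).foldl
    (fun (errors : PySem.Dict String (List String)) p =>
      if pvIsErr p.2 then errors.modify p.1 [] (fun l => l ++ [PySem.Str.strip p.2])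
      else errors)
    PySem.Dict.empty).items

-- ===== PRECONDITION & SPEC =====
def Spec_parse_interface_errors (output : String) (out : List (String × List String)) : Prop := out = parse_interface_errors_alt output
instance (output : String) (out : List (String × List String)) : Decidable (Spec_parse_interface_errors output out) := by unfold Spec_parse_interface_errors; infer_instance

-- ===== CLAIM (what is proved, stated in full; the proofs are below) =====
def Claim_equal_parse_interface_errors : Prop := ∀ (output : String), Dom_parse_interface_errors output → Spec_parse_interface_errors output (parse_interface_errors output)

-- ===== LEMMAS AND PROOFS =====

-- proof-side recursive form of pass 1 (suffix of tagged pairs from a given state)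
def tagRec : List String → Option String → List (String × String)
  | [], _ => []
  | l :: ls, cur =>
    let cur' := if PySem.Str.isIn "line protocol" l then some (pvFirstTok l) else cur
    (if pvTruthy cur' then [(cur'.getD "", l)] else []) ++ tagRec ls cur'

theorem pvTagged_foldl (ls : List String) (acc : List (String × String)) (cur : Option String) :
    (ls.foldl
      (fun (st : List (String × String) × Option String) line =>
        let c := if PySem.Str.isIn "line protocol" line then some (pvFirstTok line) else st.2
        (if pvTruthy c then st.1 ++ [(c.getD "", line)] else st.1, c))
      (acc, cur)).1 = acc ++ tagRec ls cur := by
  induction ls generalizing acc cur with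
  | nil => simp [tagRec]
  | cons l ls ih =>
    simp only [List.foldl_cons, tagRec]
    rw [ih]
    split <;> split <;> simp

theorem main_fold (ls : List String) (cur : Option String)
    (d : PySem.Dict String (List String)) :
    (ls.foldl
      (fun (st : PySem.Dict String (List String) × Option String) line =>
        let c := if PySem.Str.isIn "line protocol" line then some (pvFirstTok line) else st.2
        let errs :=
          if pvTruthy c then
            if pvIsErr line then st.1.modify (c.getD "") [] (fun l => l ++ [PySem.Str.strip line])
            else st.1
          else st.1
        (errs, c))
      (d, cur)).1
    = (tagRec ls cur).foldl
        (fun (errors : PySem.Dict String (List String)) p =>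
          if pvIsErr p.2 then errors.modify p.1 [] (fun l => l ++ [PySem.Str.strip p.2])
          else errors) d := by
  induction ls generalizing cur d with
  | nil => simp [tagRec]
  | cons l ls ih =>
    simp only [List.foldl_cons, tagRec, List.foldl_append]
    rw [ih]
    congr 1
    split <;> split <;> simp [List.foldl]

-- ===== VERDICT (by name: the statement is the Claim_ definition above) =====
theorem parse_interface_errors_spec : Claim_equal_parse_interface_errors := by
  intro output _
  show parse_interface_errors output = parse_interface_errors_alt output
  unfold parse_interface_errors parse_interface_errors_alt pvTagged
  rw [main_fold, pvTagged_foldl]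
  simp
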